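-- pv_equiv track=rewrite | github.com/alanrafaelpereyra/desafios | encontrar_el_par_o_impar.py | find_outlier1
-- ===== SOURCE A (Python) =====
-- def find_outlier1(integers):  #Buscamos contar los pares e impares para saber que buscar
--     pares=0
--     impares=0
--     for i in integers:
--         if i % 2==0:
--             pares+=1
--         else:
--             impares+=1
--     if pares ==1 :               #Si sabemos que solo hay un par, lo buscamos y entregamos
--         for i in integers:
--             if i % 2 ==0:
--                 return (i)
--             else:
--                 pass
--     if impares == 1 :          # Si sabemos que hay solo un impar, lo buscamos y entregamos
--         for i in integers:
--             if i %2 !=0: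
--                 return (i)
--             else:
--                 pass
-- ===== SOURCE B (Python) =====
-- def find_outlier1(integers):
--     pares = 0
--     impares = 0
--     first_even = None
--     first_odd = None
--     for i in integers:
--         if i % 2 == 0:
--             pares += 1
--             if first_even is None:
--                 first_even = i
--         else:
--             impares += 1
--             if first_odd is None:
--                 first_odd = i
--     if pares == 1:
--         return first_even
--     if impares == 1:
--         return first_odd
--     return None
-- ===== Notes on version B (the rewrite author's own statement) =====
-- stated objective: alternative
-- what changed: Single pass maintaining counts plus the first even / first odd seen, deciding in O(1) at the end, instead of A's count pass followed by up to two full rescan loops.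
-- outside the precondition, e.g. on find_outlier1([1, 3, 5]): A returns None, B returns None
import Mathlib
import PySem

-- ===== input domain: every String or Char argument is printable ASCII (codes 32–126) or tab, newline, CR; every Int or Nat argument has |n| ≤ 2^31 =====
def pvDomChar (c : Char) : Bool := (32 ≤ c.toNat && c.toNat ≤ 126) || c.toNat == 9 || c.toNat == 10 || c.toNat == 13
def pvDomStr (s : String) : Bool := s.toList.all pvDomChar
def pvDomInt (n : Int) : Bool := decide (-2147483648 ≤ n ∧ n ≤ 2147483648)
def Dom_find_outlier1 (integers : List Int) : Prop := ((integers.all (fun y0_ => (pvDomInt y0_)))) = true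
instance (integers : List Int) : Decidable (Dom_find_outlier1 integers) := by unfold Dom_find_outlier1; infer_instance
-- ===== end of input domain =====

-- B is one pass keeping counts and the first even / first odd seen, deciding in O(1)
-- at the end, instead of A's count pass plus up to two rescan loops (objective: alternative).


-- ===== PORT A =====
-- count pass: one loop incrementing pares/impares
def pvCountStep (s : Int × Int) (i : Int) : Int × Int :=
  if PySem.Int.mod i 2 == 0 then (s.1 + 1, s.2) else (s.1, s.2 + 1)

def find_outlier1 (integers : List Int) : Int :=
  let s := integers.foldl pvCountStep (0, 0)
  -- first rescan loop (runs only when pares == 1); Python falls through if it never returns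
  match (if s.1 == 1 then integers.find? (fun i => PySem.Int.mod i 2 == 0) else none) with
  | some v => v
  | none =>
    -- second rescan loop (runs only when impares == 1)
    match (if s.2 == 1 then integers.find? (fun i => PySem.Int.mod i 2 != 0) else none) with
    | some v => v
    | none => 0  -- Python returns None here (no int); excluded by Pre_find_outlier1

-- ===== PORT B =====
-- single-pass state: (pares, impares, first_even, first_odd)
def pvAltStep (s : Int × Int × Option Int × Option Int) (i : Int) :
    Int × Int × Option Int × Option Int :=
  if PySem.Int.mod i 2 == 0 then
    (s.1 + 1, s.2.1,
     (match s.2.2.1 with | none => some i | some v => some v),  -- if first_even is None: first_even = i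
     s.2.2.2)
  else
    (s.1, s.2.1 + 1, s.2.2.1,
     (match s.2.2.2 with | none => some i | some v => some v))  -- if first_odd is None: first_odd = i

def find_outlier1_alt (integers : List Int) : Int :=
  let s := integers.foldl pvAltStep (0, 0, none, none)
  if s.1 == 1 then (s.2.2.1).getD 0       -- return first_even (some _ here under Pre_)
  else if s.2.1 == 1 then (s.2.2.2).getD 0  -- return first_odd
  else 0  -- Python returns None here; excluded by Pre_find_outlier1

-- ===== PRECONDITION & SPEC =====
-- Pre_ excludes exactly the inputs where neither count is 1: there Python A (and B)
-- return None, which is not a value of the declared int type.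
def Pre_find_outlier1 (integers : List Int) : Prop :=
  integers.countP (fun i => PySem.Int.mod i 2 == 0) = 1 ∨
  integers.countP (fun i => PySem.Int.mod i 2 != 0) = 1
instance (integers : List Int) : Decidable (Pre_find_outlier1 integers) := by
  unfold Pre_find_outlier1; infer_instance
def pvWitness_find_outlier1 : List Int := [2, 3, 5, 7]

def Spec_find_outlier1 (integers : List Int) (out : Int) : Prop := out = find_outlier1_alt integers
instance (integers : List Int) (out : Int) : Decidable (Spec_find_outlier1 integers out) := by unfold Spec_find_outlier1; infer_instance

-- ===== CLAIM (what is proved, stated in full; the proofs are below) =====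
def Claim_equal_find_outlier1 : Prop := ∀ (integers : List Int), Dom_find_outlier1 integers → Pre_find_outlier1 integers → Spec_find_outlier1 integers (find_outlier1 integers)

-- ===== LEMMAS AND PROOFS =====

-- the counting fold computes (countP even, countP odd)
theorem pvCount_fold (l : List Int) (p q : Int) :
    l.foldl pvCountStep (p, q) =
      (p + (l.countP (fun i => PySem.Int.mod i 2 == 0) : Int),
       q + (l.countP (fun i => PySem.Int.mod i 2 != 0) : Int)) := by
  induction l generalizing p q with
  | nil => simp
  | cons a t ih =>
    by_cases h : PySem.Int.mod a 2 == 0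
    · have hm : a % 2 = 0 := by
        rw [← PySem.Int.mod_eq_emod_of_pos (by norm_num : (0:ℤ) < 2)]
        exact of_decide_eq_true h
      have hd : (2:ℤ) ∣ a := Int.dvd_of_emod_eq_zero hm
      simp [List.foldl_cons, pvCountStep, h, ih, List.countP_cons, hd, hm]
      ring
    · have hm : a % 2 = 1 := by
        have h0 : PySem.Int.mod a 2 ≠ 0 := by simpa using h
        rw [PySem.Int.mod_eq_emod_of_pos (by norm_num : (0:ℤ) < 2)] at h0
        omega
      have hd : ¬ (2:ℤ) ∣ a := by omega
      simp [List.foldl_cons, pvCountStep, h, ih, List.countP_cons, hd, hm]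
      ring

theorem pvMod2 (a : Int) : PySem.Int.mod a 2 = a % 2 :=
  PySem.Int.mod_eq_emod_of_pos (by norm_num)

-- a for-loop returning the first match is head? of the filter
theorem pvFind_eq_head_filter (p : Int → Bool) (l : List Int) :
    l.find? p = (l.filter p).head? := by
  induction l with
  | nil => rfl
  | cons a t ih =>
    by_cases h : p a <;> simp [List.find?, List.filter, h]

-- B's single-pass fold computes the same counts together with find? of each parity
theorem pvAlt_fold (l : List Int) (p q : Int) (fe fo : Option Int) :
    l.foldl pvAltStep (p, q, fe, fo) =
      (p + (l.countP (fun i => PySem.Int.mod i 2 == 0) : Int),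
       q + (l.countP (fun i => PySem.Int.mod i 2 != 0) : Int),
       (match fe with | none => l.find? (fun i => PySem.Int.mod i 2 == 0) | some v => some v),
       (match fo with | none => l.find? (fun i => PySem.Int.mod i 2 != 0) | some v => some v)) := by
  induction l generalizing p q fe fo with
  | nil => cases fe <;> cases fo <;> simp
  | cons a t ih =>
    by_cases h : PySem.Int.mod a 2 == 0
    · have hm : a % 2 = 0 := by rw [← pvMod2]; exact of_decide_eq_true h
      have hd : (2:ℤ) ∣ a := Int.dvd_of_emod_eq_zero hm
      have h' : (PySem.Int.mod a 2 != 0) = false := by simpa using h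
      simp only [List.foldl_cons, pvAltStep, h, if_pos, ih, List.countP_cons, List.find?, h']
      cases fe <;> cases fo <;> simp [hm, hd] <;> push_cast <;> ring
    · have hm : a % 2 = 1 := by
        have h0 : PySem.Int.mod a 2 ≠ 0 := by simpa using h
        rw [pvMod2] at h0; omega
      have hd : ¬ (2:ℤ) ∣ a := by omega
      have h' : (PySem.Int.mod a 2 != 0) = true := by simpa using h
      simp only [List.foldl_cons, pvAltStep, h, if_neg, ih, List.countP_cons, List.find?, h']
      cases fe <;> cases fo <;> simp [hm, hd] <;> push_cast <;> ring

-- when countP p = 1 the find? succeeds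
theorem pvFind_isSome_of_countP_one (p : Int → Bool) (l : List Int)
    (h : l.countP p = 1) : ∃ v, l.find? p = some v := by
  have : (l.filter p).length = 1 := by rwa [← List.countP_eq_length_filter]
  obtain ⟨v, hv⟩ := List.length_eq_one_iff.mp this
  exact ⟨v, by rw [pvFind_eq_head_filter, hv]; rfl⟩

theorem find_outlier1_spec : Claim_equal_find_outlier1 := by
  intro integers _ hpre
  unfold Spec_find_outlier1 find_outlier1 find_outlier1_alt
  simp only [pvCount_fold, pvAlt_fold]
  unfold Pre_find_outlier1 at hpre
  simp only [pvMod2] at hpre ⊢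
  by_cases he : integers.countP (fun i => i % 2 == 0) = 1
  · obtain ⟨v, hv⟩ := pvFind_isSome_of_countP_one _ _ he
    simp [he, hv]
  · have ho : integers.countP (fun i => i % 2 != 0) = 1 := by tauto
    obtain ⟨v, hv⟩ := pvFind_isSome_of_countP_one _ _ ho
    simp [he, ho, hv]
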